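-- pv_equiv track=rewrite | github.com/mukesh2903/ds-algorithm | Array/trap_water_problem.py | max_right
-- ===== SOURCE A (Python) =====
-- def max_right(nums):
--     arr = [0 for i in range(len(nums))]
--     for i in range(len(nums)-2, -1, -1):
--         if arr[i+1] < nums[i+1]:
--             arr[i] = nums[i+1]
--         else:
--             arr[i] = arr[i+1]
--     return arr
-- ===== SOURCE B (Python) =====
-- def max_right(nums):
--     return [max(nums[i + 1:] + [0]) for i in range(len(nums))]
-- ===== Notes on version B (the rewrite author's own statement) =====
-- stated objective: simpler
-- what changed: Replaces the mutating right-to-left accumulating pass with a one-line comprehension that recomputes each entry independently as the max of the suffix with a zero floor appended.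
import Mathlib
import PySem

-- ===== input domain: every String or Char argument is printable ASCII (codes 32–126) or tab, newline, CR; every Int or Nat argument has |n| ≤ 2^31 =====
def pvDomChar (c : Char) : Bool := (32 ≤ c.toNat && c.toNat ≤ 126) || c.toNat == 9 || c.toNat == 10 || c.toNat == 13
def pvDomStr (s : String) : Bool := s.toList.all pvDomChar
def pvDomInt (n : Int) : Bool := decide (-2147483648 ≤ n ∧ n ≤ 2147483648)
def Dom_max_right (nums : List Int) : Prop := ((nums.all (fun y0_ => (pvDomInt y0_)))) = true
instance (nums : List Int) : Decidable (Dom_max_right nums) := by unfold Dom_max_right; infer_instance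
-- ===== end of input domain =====

-- B replaces A's mutating right-to-left accumulating pass by a per-index comprehension
-- of the suffix with a zero floor appended — simpler (one line, no mutable array), not faster.

-- ===== PORT A =====
-- The loop only ever indexes positions 0 ≤ i+1 < len(nums), so the total forms
-- pyGetD/pySetD are exact here.
def max_right (nums : List Int) : List Int :=
  let arr := (PySem.List.pyRange 0 (PySem.List.len nums) 1).map (fun _ => (0 : Int))
  (PySem.List.pyRange (PySem.List.len nums - 2) (-1) (-1)).foldl
    (fun arr i =>
      if PySem.List.pyGetD arr (i + 1) 0 < PySem.List.pyGetD nums (i + 1) 0 then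
        PySem.List.pySetD arr i (PySem.List.pyGetD nums (i + 1) 0)
      else
        PySem.List.pySetD arr i (PySem.List.pyGetD arr (i + 1) 0)) arr

-- ===== PORT B =====
-- max(xs) on the suffix-plus-floor list (always nonempty) is max? …; .getD 0 is never taken.
def max_right_alt (nums : List Int) : List Int :=
  (PySem.List.pyRange 0 (PySem.List.len nums) 1).map
    (fun i => (PySem.List.max? (PySem.List.slice nums (some (i + 1)) none ++ [(0 : Int)])
                (fun y => y)).getD 0)

-- ===== PRECONDITION & SPEC =====
def Spec_max_right (nums : List Int) (out : List Int) : Prop := out = max_right_alt nums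
instance (nums : List Int) (out : List Int) : Decidable (Spec_max_right nums out) := by unfold Spec_max_right; infer_instance

-- ===== CLAIM (what is proved, stated in full; the proofs are below) =====
def Claim_equal_max_right : Prop := ∀ (nums : List Int), Dom_max_right nums → Spec_max_right nums (max_right nums)

-- ===== LEMMAS AND PROOFS =====

-- the common mathematical value: max(0, max of the suffix after position k)
def pvG (nums : List Int) (k : Nat) : Int := (nums.drop (k + 1)).foldl max 0

-- A's loop body, named for the proofs (definitionally the lambda in max_right)
def pvStep (nums arr : List Int) (i : Int) : List Int :=
  if PySem.List.pyGetD arr (i + 1) 0 < PySem.List.pyGetD nums (i + 1) 0 then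
    PySem.List.pySetD arr i (PySem.List.pyGetD nums (i + 1) 0)
  else
    PySem.List.pySetD arr i (PySem.List.pyGetD arr (i + 1) 0)

theorem foldl_max_swap (t : List Int) : ∀ a b : Int, t.foldl max (max a b) = max a (t.foldl max b) := by
  induction t with
  | nil => intro a b; rfl
  | cons c t ih =>
      intro a b
      simp only [List.foldl_cons]
      rw [max_assoc, ih]

theorem maxD0 (xs : List Int) :
    (PySem.List.max? (xs ++ [(0 : Int)]) (fun y => y)).getD 0 = xs.foldl max 0 := by
  cases xs with
  | nil => simp [PySem.List.max?_id_cons]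
  | cons x t =>
      rw [List.cons_append, PySem.List.max?_id_cons]
      simp only [Option.getD_some, List.foldl_append, List.foldl_cons, List.foldl_nil]
      rw [foldl_max_swap t 0 x]
      omega

theorem g_succ (nums : List Int) (k : Nat) (hk : k + 1 < nums.length) :
    pvG nums k = max (nums.getD (k + 1) 0) (pvG nums (k + 1)) := by
  unfold pvG
  rw [List.drop_eq_getElem_cons hk, List.foldl_cons, List.getD_eq_getElem _ _ hk]
  have := foldl_max_swap (nums.drop (k + 1 + 1)) (nums[k + 1]) 0
  rw [max_comm 0 (nums[k+1])]
  omega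

theorem step_set (nums : List Int) (m : Nat) (arr : List Int) :
    pvStep nums arr (m : Int) = arr.set m (max (arr.getD (m + 1) 0) (nums.getD (m + 1) 0)) := by
  unfold pvStep
  have h1 : ((m : Int) + 1) = ((m + 1 : Nat) : Int) := by push_cast; ring
  rw [h1]
  simp only [PySem.List.pyGetD_natCast, PySem.List.pySetD_natCast]
  split_ifs with h
  · rw [max_eq_right (le_of_lt h)]
  · rw [max_eq_left (not_lt.1 h)]

theorem loopA (nums : List Int) :
    ∀ (m : Nat) (arr : List Int), m + 2 ≤ nums.length → arr.length = nums.length →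
      (∀ i : Nat, m < i → i < nums.length → arr.getD i 0 = pvG nums i) →
      (PySem.List.pyRange (m : Int) (-1) (-1)).foldl (pvStep nums) arr
        = (List.range nums.length).map (pvG nums) := by
  intro m
  induction m with
  | zero =>
      intro arr hm hlen hhi
      simp only [Nat.cast_zero]
      rw [PySem.List.pyRange_neg_one_cons (by norm_num)]
      have hnil : PySem.List.pyRange ((0 : Int) - 1) (-1) (-1) = [] :=
        PySem.List.pyRange_neg_one_eq_nil (by norm_num)
      rw [hnil]
      simp only [List.foldl_cons, List.foldl_nil]
      have h0 : (0 : Int) = ((0 : Nat) : Int) := rfl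
      rw [h0, step_set]
      apply List.ext_getElem
      · simp [hlen]
      · intro i hi1 hi2
        simp only [List.length_set, hlen] at hi1
        rcases Nat.eq_zero_or_pos i with h | h
        · subst h
          rw [List.getElem_set_self (by omega)]
          rw [hhi 1 (by omega) (by omega)]
          simp only [List.getElem_map, List.getElem_range]
          rw [g_succ nums 0 (by omega)]
          simp [max_comm]
        · rw [List.getElem_set_ne (by omega)]
          simp only [List.getElem_map, List.getElem_range]
          rw [← List.getD_eq_getElem _ 0 (by omega), hhi i (by omega) (by omega)]
  | succ m ih =>
      intro arr hm hlen hhi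
      have hc : (((m + 1 : Nat)) : Int) = (m : Int) + 1 := by push_cast; ring
      rw [PySem.List.pyRange_neg_one_cons (by omega)]
      have hc' : ((m + 1 : Nat) : Int) - 1 = (m : Int) := by push_cast; ring
      rw [hc', List.foldl_cons]
      have hset := step_set nums (m + 1) arr
      rw [hset]
      have hlen' : (arr.set (m + 1) (max (arr.getD (m + 1 + 1) 0) (nums.getD (m + 1 + 1) 0))).length
          = nums.length := by simp only [List.length_set]; exact hlen
      apply ih _ (by omega) hlen'
      intro i hmi hin
      rcases Nat.lt_or_ge i (m + 2) with h | h
      · have hi : i = m + 1 := by omega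
        subst hi
        rw [List.getD_eq_getElem _ 0 (by simp only [List.length_set, hlen]; omega)]
        rw [List.getElem_set_self (by omega)]
        rw [hhi (m + 1 + 1) (by omega) (by omega)]
        rw [g_succ nums (m + 1) (by omega)]
        exact max_comm _ _
      · rw [List.getD_eq_getElem _ 0 (by simp only [List.length_set, hlen]; omega)]
        rw [List.getElem_set_ne (by omega)]
        rw [← List.getD_eq_getElem _ 0 (by omega), hhi i (by omega) (by omega)]

theorem B_eq (nums : List Int) :
    max_right_alt nums = (List.range nums.length).map (pvG nums) := by
  unfold max_right_alt
  rw [PySem.List.len_eq, PySem.List.pyRange_zero_natCast, List.map_map]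
  apply List.map_congr_left
  intro k _
  simp only [Function.comp]
  have h1 : ((k : Int) + 1) = ((k + 1 : Nat) : Int) := by push_cast; ring
  rw [h1, PySem.List.slice_from_natCast, maxD0]
  rfl

theorem A_eq (nums : List Int) :
    max_right nums = (List.range nums.length).map (pvG nums) := by
  show (PySem.List.pyRange (PySem.List.len nums - 2) (-1) (-1)).foldl (pvStep nums)
        ((PySem.List.pyRange 0 (PySem.List.len nums) 1).map (fun _ => (0 : Int)))
      = (List.range nums.length).map (pvG nums)
  have hinit : ((PySem.List.pyRange 0 (PySem.List.len nums) 1).map (fun _ => (0 : Int)))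
      = List.replicate nums.length (0 : Int) := by
    rw [PySem.List.len_eq, PySem.List.pyRange_zero_natCast, List.map_map]
    apply List.ext_getElem <;> simp
  rw [hinit]
  rcases Nat.lt_or_ge nums.length 2 with h | h
  · -- short lists: the loop range is empty
    have hnil : PySem.List.pyRange (PySem.List.len nums - 2) (-1) (-1) = [] := by
      apply PySem.List.pyRange_neg_one_eq_nil
      rw [PySem.List.len_eq]; omega
    rw [hnil, List.foldl_nil]
    interval_cases hl : nums.length
    · simp
    · apply List.ext_getElem
      · simp
      · intro i hi1 hi2
        simp only [List.length_replicate] at hi1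
        have : i = 0 := by omega
        subst this
        simp only [List.getElem_replicate, List.getElem_map, List.getElem_range]
        unfold pvG
        rw [List.drop_eq_nil_of_le (by omega)]
        rfl
  · have hc : PySem.List.len nums - 2 = ((nums.length - 2 : Nat) : Int) := by
      rw [PySem.List.len_eq]; omega
    rw [hc]
    apply loopA nums (nums.length - 2)
    · omega
    · simp
    · intro i hmi hin
      have : i = nums.length - 1 := by omega
      subst this
      rw [List.getD_eq_getElem _ 0 (by simp; omega)]
      simp only [List.getElem_replicate]
      unfold pvG
      rw [List.drop_eq_nil_of_le (by omega)]
      rfl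

-- ===== VERDICT (by name: the statement is the Claim_ definition above) =====
theorem max_right_spec : Claim_equal_max_right := by
  intro nums _
  unfold Spec_max_right
  rw [A_eq, B_eq]
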